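-- pv_equiv track=rewrite | github.com/Hercerthe/2110101-Comp-prog | Grader/09_MoreDC_xx/09_MoreDC_34.py | pattern5
-- ===== SOURCE A (Python) =====
-- def pattern5(N):
--     if N == 0 :
--         return []
--     x = []
--     s = 1
--     for i in range(N) :
--         x.append([])
--     for i in range(N) :
--         for e in range(i) :
--             x[i].append(0)
--     while len(x[0]) < N :
--         for i in range(N) :
--             if len(x[i]) < N :
--                 x[i].append(s)
--                 s += 1
--     return x
-- ===== SOURCE B (Python) =====
-- def pattern5(N):
--     m = [[0] * N for _ in range(N)]
--     s = 1
--     for d in range(N):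
--         for i in range(N - d):
--             m[i][i + d] = s
--             s += 1
--     return m
-- ===== Notes on version B (the rewrite author's own statement) =====
-- stated objective: simpler
-- what changed: B preallocates the N x N zero matrix and fills the upper triangle by iterating over diagonals directly (for d, for i: m[i][i+d]=s), replacing A's row-setup loops and its repeated whole-matrix while-scan that appends one element per unfinished row per pass.
import Mathlib
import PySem

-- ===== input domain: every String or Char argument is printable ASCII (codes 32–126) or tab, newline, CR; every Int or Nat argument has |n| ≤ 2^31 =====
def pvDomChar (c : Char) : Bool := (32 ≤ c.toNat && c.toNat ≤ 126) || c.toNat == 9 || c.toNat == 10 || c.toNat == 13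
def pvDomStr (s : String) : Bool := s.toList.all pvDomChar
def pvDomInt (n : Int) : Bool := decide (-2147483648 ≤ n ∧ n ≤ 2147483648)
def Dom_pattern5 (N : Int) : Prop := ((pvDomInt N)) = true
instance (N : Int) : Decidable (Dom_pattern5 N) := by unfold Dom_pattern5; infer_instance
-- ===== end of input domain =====

-- B fills a preallocated zero matrix diagonal-by-diagonal instead of A's row-setup loops plus
-- repeated whole-matrix append passes: a simpler decomposition of the same O(N^2) task.


-- ===== PORT A =====
-- body of the inner 'for i in range(N)' of the while loop (x[i] is indexed with nonnegative i only)
def pattern5Step (N : Int) (st : List (List Int) × Int) (i : Int) : List (List Int) × Int :=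
  match PySem.List.pyGet? st.1 i with
  | none => st
  | some row =>
    if (row.length : Int) < N then (st.1.modify i.toNat (· ++ [st.2]), st.2 + 1) else st

-- the 'while len(x[0]) < N' loop; the fuel N.toNat + 1 bounds the number of passes (proved below);
-- on empty x Python raises IndexError (pyGet? = none) — those N are excluded by Pre_pattern5
def pattern5Loop (N : Int) : Nat → List (List Int) → Int → List (List Int)
  | 0, x, _ => x
  | fuel+1, x, s =>
    match PySem.List.pyGet? x 0 with
    | none => x
    | some r0 =>
      if (r0.length : Int) < N then
        let st := (PySem.List.pyRange 0 N 1).foldl (pattern5Step N) (x, s)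
        pattern5Loop N fuel st.1 st.2
      else x

def pattern5 (N : Int) : List (List Int) :=
  if N = 0 then []
  else
    let x : List (List Int) := (PySem.List.pyRange 0 N 1).foldl (fun x _ => x ++ [[]]) []
    let x := (PySem.List.pyRange 0 N 1).foldl
      (fun x i => (PySem.List.pyRange 0 i 1).foldl
        (fun x _ => x.modify i.toNat (· ++ [(0 : Int)])) x) x
    pattern5Loop N (N.toNat + 1) x 1

-- ===== PORT B =====
def pattern5_alt (N : Int) : List (List Int) :=
  let m : List (List Int) := (PySem.List.pyRange 0 N 1).map (fun _ => List.replicate N.toNat (0 : Int))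
  let st := (PySem.List.pyRange 0 N 1).foldl
    (fun st d => (PySem.List.pyRange 0 (N - d) 1).foldl
      (fun (st : List (List Int) × Int) i =>
        (st.1.modify i.toNat (fun row => row.set (i + d).toNat st.2), st.2 + 1)) st) (m, 1)
  st.1

-- ===== PRECONDITION & SPEC =====
-- A raises IndexError for N < 0 (x stays empty, len(x[0]) fails); Pre_ admits exactly the N where A returns
def Pre_pattern5 (N : Int) : Prop := 0 ≤ N
instance (N : Int) : Decidable (Pre_pattern5 N) := by unfold Pre_pattern5; infer_instance
def pvWitness_pattern5 : Int := (4)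

def Spec_pattern5 (N : Int) (out : List (List Int)) : Prop := out = pattern5_alt N
instance (N : Int) (out : List (List Int)) : Decidable (Spec_pattern5 N out) := by unfold Spec_pattern5; infer_instance

-- ===== CLAIM (what is proved, stated in full; the proofs are below) =====
def Claim_equal_pattern5 : Prop := ∀ (N : Int), Dom_pattern5 N → Pre_pattern5 N → Spec_pattern5 N (pattern5 N)

-- ===== LEMMAS AND PROOFS =====
-- sk n k = counter value when pass/diagonal k starts (passes 0..k-1 wrote n, n-1, …, n-k+1 entries);
-- rowA/XA describe A's matrix after k while-passes, rowB/XB describe B's after k filled diagonals.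

def sk (n k : Nat) : Int :=
  match k with
  | 0 => 1
  | k+1 => sk n k + ((n : Int) - k)

def rowA (n k i : Nat) : List Int :=
  List.replicate i 0 ++ (List.range (min k (n - i))).map (fun d => sk n d + i)

def XA (n k : Nat) : List (List Int) := (List.range n).map (rowA n k)

def rowB (n d i : Nat) : List Int :=
  List.replicate i 0 ++ (List.range (min d (n - i))).map (fun t => sk n t + i)
    ++ List.replicate (n - i - min d (n - i)) 0

def XB (n d : Nat) : List (List Int) := (List.range n).map (rowB n d)

theorem modify_modify {α : Type} (x : List α) (k : Nat) (f g : α → α) :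
    (x.modify k f).modify k g = x.modify k (fun a => g (f a)) := by
  induction x generalizing k with
  | nil => simp
  | cons a l ih => cases k <;> simp [List.modify_cons, ih]

theorem modify_id {α : Type} (x : List α) (k : Nat) :
    x.modify k (fun a => a) = x := by
  induction x generalizing k with
  | nil => simp
  | cons a l ih => cases k <;> simp [List.modify_cons, ih]

theorem foldl_app {α β : Type} (e : β) : ∀ (l : List α) (init : List β),
    l.foldl (fun x _ => x ++ [e]) init = init ++ List.replicate l.length e
  | [], init => by simp
  | a :: l, init => by
    simp [List.foldl_cons, foldl_app e l, List.replicate_succ]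

theorem A_init1 (n : Nat) :
    (PySem.List.pyRange 0 (n : Int) 1).foldl (fun x _ => x ++ [[]]) ([] : List (List Int))
      = List.replicate n [] := by
  rw [foldl_app]
  simp

theorem inner_append : ∀ (l : List Int) (x : List (List Int)) (k : Nat),
    l.foldl (fun x _ => x.modify k (· ++ [(0 : Int)])) x
      = x.modify k (· ++ List.replicate l.length 0)
  | [], x, k => by simpa using (modify_id x k).symm
  | a :: l, x, k => by
    rw [List.foldl_cons, inner_append l, modify_modify]
    congr 1
    funext r
    simp [List.replicate_succ]

theorem A_init2 (n : Nat) :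
    (PySem.List.pyRange 0 (n : Int) 1).foldl
      (fun x i => (PySem.List.pyRange 0 i 1).foldl
        (fun x _ => x.modify i.toNat (· ++ [(0 : Int)])) x) (List.replicate n [])
      = XA n 0 := by
  have key : ∀ m, m ≤ n →
      (PySem.List.pyRange 0 (m : Int) 1).foldl
        (fun x i => (PySem.List.pyRange 0 i 1).foldl
          (fun x _ => x.modify i.toNat (· ++ [(0 : Int)])) x) (List.replicate n [])
      = (List.range n).map (fun i => if i < m then List.replicate i (0 : Int) else []) := by
    intro m hm
    induction m with
    | zero => simp [List.map_const']
    | succ m ih =>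
      have hc : ((m + 1 : Nat) : Int) = (m : Int) + 1 := by push_cast; ring
      rw [hc, PySem.List.pyRange_one_succ_right (by positivity), List.foldl_append,
        ih (by omega)]
      simp only [List.foldl_cons, List.foldl_nil]
      rw [inner_append]
      apply List.ext_getElem (by simp)
      intro j h1 h2
      simp only [List.getElem_modify, List.getElem_map, List.getElem_range,
        PySem.List.length_pyRange_one, Int.toNat_natCast] at *
      by_cases hj : m = j
      · subst hj
        simp
      · simp only [hj, if_false]
        split_ifs <;> first | rfl | omega
  rw [key n le_rfl]
  unfold XA rowA
  apply List.map_congr_left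
  intro i hi
  simp at hi
  simp [hi]

theorem rowA_length (n k i : Nat) : (rowA n k i).length = i + min k (n - i) := by
  simp [rowA]

theorem rowA_stable (n k i : Nat) (h : n - i ≤ k) : rowA n (k+1) i = rowA n k i := by
  unfold rowA
  have : min (k+1) (n - i) = n - i := by omega
  have h2 : min k (n - i) = n - i := by omega
  rw [this, h2]

theorem rowA_append (n k m : Nat) (h : m < n - k) :
    rowA n k m ++ [sk n k + m] = rowA n (k+1) m := by
  unfold rowA
  have h1 : min k (n - m) = k := by omega
  have h2 : min (k+1) (n - m) = k + 1 := by omega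
  rw [h1, h2, List.range_succ, List.map_append, List.append_assoc]
  rfl

theorem A_pass (n k : Nat) (hk : k < n) :
    (PySem.List.pyRange 0 (n : Int) 1).foldl (pattern5Step (n : Int)) (XA n k, sk n k)
      = (XA n (k+1), sk n (k+1)) := by
  have key : ∀ m, m ≤ n →
      (PySem.List.pyRange 0 (m : Int) 1).foldl (pattern5Step (n : Int)) (XA n k, sk n k)
      = ((List.range n).map (fun i => rowA n (if i < min m (n - k) then k+1 else k) i),
         sk n k + min m (n - k)) := by
    intro m hm
    induction m with
    | zero =>
      simp only [Nat.cast_zero, PySem.List.pyRange_one_eq_nil le_rfl, List.foldl_nil,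
        Nat.cast_zero]
      simp only [Prod.mk.injEq]
      refine ⟨?_, ?_⟩
      · unfold XA
        apply List.map_congr_left
        intro i _
        simp
      · simp
    | succ m ih =>
      have hc : ((m + 1 : Nat) : Int) = (m : Int) + 1 := by push_cast; ring
      rw [hc, PySem.List.pyRange_one_succ_right (by positivity), List.foldl_append,
        ih (by omega)]
      simp only [List.foldl_cons, List.foldl_nil]
      unfold pattern5Step
      rw [PySem.List.pyGet?_natCast]
      rw [List.getElem?_map, List.getElem?_range (by omega : m < n)]
      simp only [Option.map_some]
      have hmm : ¬ m < min m (n - k) := by omega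
      simp only [hmm, if_false]
      rw [rowA_length]
      by_cases hcase : m < n - k
      · have hlen : ((m + min k (n - m) : Nat) : Int) < (n : Int) := by
          have : min k (n - m) = k := by omega
          rw [this]; push_cast; omega
        rw [if_pos hlen]
        have hmin : min m (n - k) = m := by omega
        have hmin' : min (m+1) (n - k) = m + 1 := by omega
        rw [hmin, hmin']
        simp only [Prod.mk.injEq]
        refine ⟨?_, ?_⟩
        · apply List.ext_getElem (by simp)
          intro j h1 h2
          simp only [Int.toNat_natCast, List.getElem_modify, List.getElem_map,
            List.getElem_range]
          by_cases hj : m = j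
          · subst hj
            simpa using rowA_append n k m hcase
          · simp only [hj, if_false]
            by_cases hjm : j < m
            · rw [if_pos hjm, if_pos (by omega : j < m + 1)]
            · rw [if_neg hjm, if_neg (by omega : ¬ j < m + 1)]
        · push_cast; ring
      · have hlen : ¬ ((m + min k (n - m) : Nat) : Int) < (n : Int) := by
          have : min k (n - m) = n - m := by omega
          rw [this]; push_cast; omega
        rw [if_neg hlen]
        have hmin : min m (n - k) = n - k := by omega
        have hmin' : min (m+1) (n - k) = n - k := by omega
        rw [hmin, hmin']
  rw [key n le_rfl]
  have hmin : min n (n - k) = n - k := by omega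
  rw [hmin]
  simp only [Prod.mk.injEq]
  refine ⟨?_, ?_⟩
  · unfold XA
    apply List.map_congr_left
    intro i hi
    simp only [List.mem_range] at hi
    by_cases h : i < n - k
    · rw [if_pos h]
    · rw [if_neg h]
      exact (rowA_stable n k i (by omega)).symm
  · show _ = sk n k + ((n:Int) - k)
    congr 1
    omega

theorem A_loop (n : Nat) (hn : 0 < n) : ∀ (fuel k : Nat), k ≤ n → n - k < fuel →
    pattern5Loop (n : Int) fuel (XA n k) (sk n k) = XA n n := by
  intro fuel
  induction fuel with
  | zero => intro k _ h; omega
  | succ fuel ih =>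
    intro k hk hf
    have hget : PySem.List.pyGet? (XA n k) 0 = some (rowA n k 0) := by
      rw [PySem.List.pyGet?_zero]
      unfold XA
      rw [List.getElem?_map, List.getElem?_range hn]
      rfl
    have hlen : (rowA n k 0).length = min k n := by
      rw [rowA_length]; omega
    simp only [pattern5Loop, hget, hlen]
    by_cases hkn : k < n
    · rw [if_pos (by push_cast; omega)]
      simp only [A_pass n k hkn]
      exact ih (k+1) (by omega) (by omega)
    · have hke : k = n := by omega
      subst hke
      rw [if_neg (by push_cast; omega)]

theorem rowB_zero (n i : Nat) (h : i ≤ n) : rowB n 0 i = List.replicate n (0 : Int) := by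
  unfold rowB
  simp only [Nat.zero_min, List.range_zero, List.map_nil, Nat.sub_zero, List.append_nil]
  rw [List.replicate_append_replicate]
  congr 1
  omega

theorem rowB_stable (n d i : Nat) (h : n - i ≤ d) : rowB n (d+1) i = rowB n d i := by
  unfold rowB
  have h1 : min (d+1) (n - i) = n - i := by omega
  have h2 : min d (n - i) = n - i := by omega
  rw [h1, h2]

theorem rowB_set (n d m : Nat) (h : m < n - d) :
    (rowB n d m).set (m + d) (sk n d + m) = rowB n (d+1) m := by
  unfold rowB
  have h1 : min d (n - m) = d := by omega
  have h2 : min (d+1) (n - m) = d + 1 := by omega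
  rw [h1, h2]
  have hlen : (List.replicate m (0:Int) ++ (List.range d).map (fun t => sk n t + m)).length = m + d := by
    simp
  rw [List.set_append_right _ _ (by rw [hlen])]
  rw [hlen, Nat.sub_self]
  have hrep : (n - m - d) = (n - m - (d+1)) + 1 := by omega
  rw [hrep, List.replicate_succ, List.set_cons_zero]
  rw [List.range_succ, List.map_append, List.append_assoc]
  simp

theorem B_inner (n d : Nat) (hd : d < n) :
    (PySem.List.pyRange 0 ((n : Int) - (d : Int)) 1).foldl
      (fun (st : List (List Int) × Int) (i : Int) =>
        (st.1.modify i.toNat (fun row => row.set (i + (d : Int)).toNat st.2), st.2 + 1)) (XB n d, sk n d)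
      = (XB n (d+1), sk n (d+1)) := by
  have key : ∀ m, m ≤ n - d →
      (PySem.List.pyRange 0 (m : Int) 1).foldl
        (fun (st : List (List Int) × Int) (i : Int) =>
          (st.1.modify i.toNat (fun row => row.set (i + (d : Int)).toNat st.2), st.2 + 1)) (XB n d, sk n d)
      = ((List.range n).map (fun i => rowB n (if i < m then d+1 else d) i), sk n d + m) := by
    intro m hm
    induction m with
    | zero =>
      simp only [Nat.cast_zero, PySem.List.pyRange_one_eq_nil le_rfl, List.foldl_nil]
      simp only [Prod.mk.injEq]
      refine ⟨?_, by simp⟩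
      unfold XB
      apply List.map_congr_left
      intro i _
      simp
    | succ m ih =>
      have hc : ((m + 1 : Nat) : Int) = (m : Int) + 1 := by push_cast; ring
      rw [hc, PySem.List.pyRange_one_succ_right (by positivity), List.foldl_append,
        ih (by omega)]
      simp only [List.foldl_cons, List.foldl_nil]
      simp only [Prod.mk.injEq]
      have hid : ((m : Int) + (d : Int)).toNat = m + d := by omega
      refine ⟨?_, by ring⟩
      rw [hid, Int.toNat_natCast]
      apply List.ext_getElem (by simp)
      intro j h1 h2
      simp only [List.getElem_modify, List.getElem_map, List.getElem_range]
      by_cases hj : m = j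
      · subst hj
        simpa using rowB_set n d m (by omega)
      · simp only [hj, if_false]
        by_cases hjm : j < m
        · rw [if_pos hjm, if_pos (by omega : j < m + 1)]
        · rw [if_neg hjm, if_neg (by omega : ¬ j < m + 1)]
  have hnd : ((n : Int) - (d : Int)) = ((n - d : Nat) : Int) := by omega
  rw [hnd, key (n - d) le_rfl]
  simp only [Prod.mk.injEq]
  refine ⟨?_, ?_⟩
  · unfold XB
    apply List.map_congr_left
    intro i hi
    simp only [List.mem_range] at hi
    by_cases h : i < n - d
    · rw [if_pos h]
    · rw [if_neg h]
      exact (rowB_stable n d i (by omega)).symm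
  · show _ = sk n d + ((n:Int) - d)
    congr 1
    omega

theorem B_outer (n : Nat) :
    (PySem.List.pyRange 0 (n : Int) 1).foldl
      (fun st (d : Int) => (PySem.List.pyRange 0 ((n : Int) - d) 1).foldl
        (fun (st : List (List Int) × Int) (i : Int) =>
          (st.1.modify i.toNat (fun row => row.set (i + d).toNat st.2), st.2 + 1)) st)
      (XB n 0, 1)
      = (XB n n, sk n n) := by
  have key : ∀ m, m ≤ n →
      (PySem.List.pyRange 0 (m : Int) 1).foldl
        (fun st (d : Int) => (PySem.List.pyRange 0 ((n : Int) - d) 1).foldl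
          (fun (st : List (List Int) × Int) (i : Int) =>
            (st.1.modify i.toNat (fun row => row.set (i + d).toNat st.2), st.2 + 1)) st)
        (XB n 0, 1)
      = (XB n m, sk n m) := by
    intro m hm
    induction m with
    | zero =>
      simp only [Nat.cast_zero, PySem.List.pyRange_one_eq_nil le_rfl, List.foldl_nil]
      rfl
    | succ m ih =>
      have hc : ((m + 1 : Nat) : Int) = (m : Int) + 1 := by push_cast; ring
      rw [hc, PySem.List.pyRange_one_succ_right (by positivity), List.foldl_append,
        ih (by omega)]
      simp only [List.foldl_cons, List.foldl_nil]
      exact B_inner n m (by omega)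
  exact key n le_rfl

theorem XA_eq_XB (n : Nat) : XA n n = XB n n := by
  unfold XA XB
  apply List.map_congr_left
  intro i hi
  simp only [List.mem_range] at hi
  unfold rowA rowB
  have h1 : min n (n - i) = n - i := by omega
  rw [h1]
  simp

theorem alt_eq (n : Nat) : pattern5_alt (n : Int) = XB n n := by
  unfold pattern5_alt
  have hm : (PySem.List.pyRange 0 (n : Int) 1).map (fun _ => List.replicate n (0 : Int))
      = XB n 0 := by
    rw [List.map_const']
    unfold XB
    rw [show ((List.range n).map (rowB n 0)) = (List.range n).map (fun _ => List.replicate n (0:Int)) from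
      List.map_congr_left (fun i hi => rowB_zero n i (by simp at hi; omega))]
    rw [List.map_const']
    simp
  simp only [Int.toNat_natCast]
  rw [hm, B_outer n]

theorem a_eq (n : Nat) : pattern5 (n : Int) = XA n n := by
  unfold pattern5
  by_cases h0 : n = 0
  · subst h0
    simp [XA]
  · rw [if_neg (by omega : ¬ ((n : Int) = 0))]
    simp only [A_init1 n, A_init2 n, Int.toNat_natCast]
    have := A_loop n (by omega) (n + 1) 0 (by omega) (by omega)
    simpa [sk] using this


-- ===== VERDICT (by name: the statement is the Claim_ definition above) =====
theorem pattern5_spec : Claim_equal_pattern5 := by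
  intro N _ hP
  unfold Spec_pattern5
  obtain ⟨n, rfl⟩ := Int.eq_ofNat_of_zero_le hP
  rw [a_eq, alt_eq, XA_eq_XB]
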